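-- pv_equiv track=rewrite | github.com/petedur/BPD-Tracker | app.py | compute_switches
-- ===== SOURCE A (Python) =====
-- from typing import Dict, List, Tuple
--
-- def compute_switches(day_to_mood: Dict[str, str]) -> List[Tuple[str, str, str]]:
--     """
--     Detect changes between high/low energy labels (ignoring neutral).
--     Returns a list of (date, from_mood, to_mood).
--     """
--     if not day_to_mood:
--         return []
--     days_sorted = sorted(day_to_mood.keys())
--     switches: List[Tuple[str, str, str]] = []
--
--     prev_mood = None
--     prev_day = None
--     for d in days_sorted:
--         mood = day_to_mood[d]
--         if mood == "neutral":
--             continue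
--         if prev_mood is None:
--             prev_mood = mood
--             prev_day = d
--             continue
--         if mood != prev_mood:
--             switches.append((d, prev_mood, mood))
--             prev_mood = mood
--             prev_day = d
--
--     return switches
-- ===== SOURCE B (Python) =====
-- def compute_switches(day_to_mood):
--     """Divide-and-conquer over the filtered, sorted (day, mood) sequence."""
--     seq = [p for p in sorted(day_to_mood.items(), key=lambda p: p[0]) if p[1] != "neutral"]
--
--     def rec(part):
--         if len(part) < 2:
--             return []
--         mid = len(part) // 2
--         left, right = part[:mid], part[mid:]
--         out = rec(left)
--         a, b = left[-1], right[0]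
--         if a[1] != b[1]:
--             out.append((b[0], a[1], b[1]))
--         return out + rec(right)
--
--     return rec(seq)
-- ===== Notes on version B (the rewrite author's own statement) =====
-- stated objective: alternative
-- what changed: Replaced A's single fused pass with running prev_mood/prev_day state by a divide-and-conquer: filter neutrals from the sorted items once, then recursively split the sequence in half, concatenating the left half's switches, the one boundary switch between the halves (if their adjacent moods differ), and the right half's switches. Pre_ only excludes association lists with duplicate keys, which do not represent a Python dict.
import Mathlib
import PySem

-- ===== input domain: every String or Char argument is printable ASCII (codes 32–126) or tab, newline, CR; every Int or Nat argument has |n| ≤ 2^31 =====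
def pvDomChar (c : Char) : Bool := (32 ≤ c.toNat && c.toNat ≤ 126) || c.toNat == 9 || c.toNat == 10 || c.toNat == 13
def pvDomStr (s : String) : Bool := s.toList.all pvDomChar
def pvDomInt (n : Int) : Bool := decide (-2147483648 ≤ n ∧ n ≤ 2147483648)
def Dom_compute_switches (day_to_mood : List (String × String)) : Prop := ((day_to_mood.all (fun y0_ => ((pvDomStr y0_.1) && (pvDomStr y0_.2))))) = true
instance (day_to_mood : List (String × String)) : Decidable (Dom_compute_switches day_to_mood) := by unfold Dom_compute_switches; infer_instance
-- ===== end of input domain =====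

-- B replaces A's fused stateful pass (running prev_mood/prev_day over sorted keys) by a
-- divide-and-conquer over the filtered, sorted items: split in half, recurse, add the one
-- boundary switch between the halves; alternative decomposition, not faster.

-- ===== PORT A =====
-- the loop body of A: state = (switches, prev_mood, prev_day), iterating over sorted days
def pvA_step (d : PySem.Dict String String)
    (s : List (String × String × String) × Option String × Option String)
    (day : String) : List (String × String × String) × Option String × Option String :=
  let mood := d.getD day ""
  if mood = "neutral" then s
  else
    match s.2.1 with
    | none => (s.1, some mood, some day)
    | some p => if mood ≠ p then (s.1 ++ [(day, p, mood)], some mood, some day) else s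

def compute_switches (day_to_mood : List (String × String)) : List (String × String × String) :=
  if day_to_mood = [] then []
  else
    let d := PySem.Dict.mk day_to_mood
    let days_sorted := PySem.List.sorted d.keys (fun k => k)
    (days_sorted.foldl (pvA_step d) ([], none, none)).1

-- ===== PORT B =====
-- Source B's inner 'rec': split at mid = len // 2 (Nat division = Python // on these nonnegative
-- lengths), left = part[:mid], right = part[mid:], emit the boundary switch from
-- left[-1] (PySem.List.pyGet? left (-1)) and right[0]; the 'none' fallbacks are unreachable
-- (2 ≤ len makes both halves nonempty) and mirror that Python never indexes an empty half.
def pvB_rec (part : List (String × String)) : List (String × String × String) :=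
  if _h : part.length < 2 then []
  else
    let mid := part.length / 2
    let left := part.take mid
    let right := part.drop mid
    let out := pvB_rec left
    match PySem.List.pyGet? left (-1), PySem.List.pyGet? right 0 with
    | some a, some b =>
        (if a.2 ≠ b.2 then out ++ [(b.1, a.2, b.2)] else out) ++ pvB_rec right
    | _, _ => out ++ pvB_rec right
termination_by part.length
decreasing_by
  · simp only [List.length_take]; omega
  · simp only [List.length_drop]; omega

def compute_switches_alt (day_to_mood : List (String × String)) : List (String × String × String) :=
  let seq := (PySem.List.sorted (PySem.Dict.mk day_to_mood).items (fun p => p.1)).filter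
      (fun p => p.2 != "neutral")
  pvB_rec seq

-- ===== PRECONDITION & SPEC =====
-- Pre_ excludes association lists with duplicate keys: they do not represent a Python dict
-- (dict construction collapses them), so the assoc-list reading of the input is ambiguous there.
def Pre_compute_switches (day_to_mood : List (String × String)) : Prop :=
  (day_to_mood.map Prod.fst).Nodup
instance (day_to_mood : List (String × String)) : Decidable (Pre_compute_switches day_to_mood) := by
  unfold Pre_compute_switches; infer_instance

def pvWitness_compute_switches : (List (String × String)) :=
  [("2024-01-02", "low"), ("2024-01-01", "high"), ("2024-01-03", "neutral"), ("2024-01-04", "high")]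

def Spec_compute_switches (day_to_mood : List (String × String)) (out : List (String × String × String)) : Prop := out = compute_switches_alt day_to_mood
instance (day_to_mood : List (String × String)) (out : List (String × String × String)) : Decidable (Spec_compute_switches day_to_mood out) := by unfold Spec_compute_switches; infer_instance

-- ===== CLAIM (what is proved, stated in full; the proofs are below) =====
def Claim_equal_compute_switches : Prop := ∀ (day_to_mood : List (String × String)), Dom_compute_switches day_to_mood → Pre_compute_switches day_to_mood → Spec_compute_switches day_to_mood (compute_switches day_to_mood)

-- ===== LEMMAS AND PROOFS =====

-- A's loop, after the first non-neutral element fixed prev_mood = pm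
def pvLoopS (pm : String) : List (String × String) → List (String × String × String)
  | [] => []
  | (d, m) :: t =>
    if m = "neutral" then pvLoopS pm t
    else if m ≠ pm then (d, pm, m) :: pvLoopS m t
    else pvLoopS pm t

-- A's loop from the initial prev_mood = None state
def pvLoopN : List (String × String) → List (String × String × String)
  | [] => []
  | (_, m) :: t => if m = "neutral" then pvLoopN t else pvLoopS m t

-- A's step on (day, mood) pairs directly
def pvStepP (s : List (String × String × String) × Option String × Option String)
    (p : String × String) : List (String × String × String) × Option String × Option String :=
  if p.2 = "neutral" then s
  else
    match s.2.1 with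
    | none => (s.1, some p.2, some p.1)
    | some q => if p.2 ≠ q then (s.1 ++ [(p.1, q, p.2)], some p.2, some p.1) else s

-- the switch emitted between two adjacent non-neutral entries
def pvStepT (a b : String × String) : List (String × String × String) :=
  if a.2 ≠ b.2 then [(b.1, a.2, b.2)] else []

-- the switches of a neutral-free sequence: one pvStepT per adjacent pair
def pvAdj : List (String × String) → List (String × String × String)
  | [] => []
  | [_] => []
  | a :: b :: t => pvStepT a b ++ pvAdj (b :: t)

-- the boundary switch between two blocks
def pvBridge (xs ys : List (String × String)) : List (String × String × String) :=
  match xs.getLast?, ys.head? with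
  | some a, some b => pvStepT a b
  | _, _ => []

theorem pv_foldS (ws : List (String × String)) :
    ∀ (sw : List (String × String × String)) (pm : String) (pd : Option String),
      (ws.foldl pvStepP (sw, some pm, pd)).1 = sw ++ pvLoopS pm ws := by
  induction ws with
  | nil => intro sw pm pd; simp [pvLoopS]
  | cons hd t ih =>
    intro sw pm pd
    obtain ⟨d, m⟩ := hd
    by_cases hneu : m = "neutral"
    · simp [List.foldl_cons, pvStepP, pvLoopS, hneu, ih]
    · by_cases hne : m = pm
      · simp [List.foldl_cons, pvStepP, pvLoopS, hne, ih]
      · simp [List.foldl_cons, pvStepP, pvLoopS, hneu, hne, ih]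

theorem pv_foldN (ws : List (String × String)) :
    ∀ (sw : List (String × String × String)) (pd : Option String),
      (ws.foldl pvStepP (sw, none, pd)).1 = sw ++ pvLoopN ws := by
  induction ws with
  | nil => intro sw pd; simp [pvLoopN]
  | cons hd t ih =>
    intro sw pd
    obtain ⟨d, m⟩ := hd
    by_cases hneu : m = "neutral"
    · simp [List.foldl_cons, pvStepP, pvLoopN, hneu, ih]
    · simp [List.foldl_cons, pvStepP, pvLoopN, hneu, pv_foldS]

theorem pv_loopS_filter (ws : List (String × String)) :
    ∀ pm, pvLoopS pm (ws.filter (fun p => p.2 != "neutral")) = pvLoopS pm ws := by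
  induction ws with
  | nil => intro pm; rfl
  | cons hd t ih =>
    intro pm
    obtain ⟨d, m⟩ := hd
    by_cases hneu : m = "neutral"
    · simp [hneu, pvLoopS, ih]
    · by_cases hne : m = pm
      · subst hne; simp [hneu, pvLoopS, ih]
      · simp [hneu, pvLoopS, hne, ih]

theorem pv_loopN_filter (ws : List (String × String)) :
    pvLoopN (ws.filter (fun p => p.2 != "neutral")) = pvLoopN ws := by
  induction ws with
  | nil => rfl
  | cons hd t ih =>
    obtain ⟨d, m⟩ := hd
    by_cases hneu : m = "neutral"
    · simp [hneu, pvLoopN, ih]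
    · simp [hneu, pvLoopN, pv_loopS_filter]

-- on a neutral-free sequence A's loop is exactly the adjacent-pair switches
theorem pv_loopS_adj (t : List (String × String)) :
    ∀ q : String × String, (∀ p ∈ t, p.2 ≠ "neutral") → pvLoopS q.2 t = pvAdj (q :: t) := by
  induction t with
  | nil => intro q _; rfl
  | cons hd t ih =>
    intro q hneu
    obtain ⟨d, m⟩ := hd
    have hm : m ≠ "neutral" := hneu (d, m) (List.mem_cons_self ..)
    have ht : ∀ p ∈ t, p.2 ≠ "neutral" := fun p hp => hneu p (List.mem_cons_of_mem _ hp)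
    by_cases hne : m = q.2
    · have h2 : pvLoopS m t = pvAdj ((d, m) :: t) := ih (d, m) ht
      have hstep : pvStepT q (d, m) = [] := by simp [pvStepT, hne]
      calc pvLoopS q.2 ((d, m) :: t) = pvLoopS q.2 t := by simp [pvLoopS, hne]
        _ = pvLoopS m t := by rw [hne]
        _ = pvAdj ((d, m) :: t) := h2
        _ = pvStepT q (d, m) ++ pvAdj ((d, m) :: t) := by rw [hstep]; rfl
        _ = pvAdj (q :: (d, m) :: t) := rfl
    · have h2 : pvLoopS m t = pvAdj ((d, m) :: t) := ih (d, m) ht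
      have hne' : ¬ q.2 = m := fun h => hne h.symm
      simp [pvLoopS, pvAdj, pvStepT, hm, hne, hne', h2]

theorem pv_loopN_adj (ws : List (String × String)) (h : ∀ p ∈ ws, p.2 ≠ "neutral") :
    pvLoopN ws = pvAdj ws := by
  cases ws with
  | nil => rfl
  | cons w t =>
    obtain ⟨d, m⟩ := w
    have hm : m ≠ "neutral" := h (d, m) (List.mem_cons_self ..)
    have := pv_loopS_adj t (d, m) (fun p hp => h p (List.mem_cons_of_mem _ hp))
    simpa [pvLoopN, hm] using this

-- adjacent-pair switches split across a concatenation into the two parts and one bridge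
theorem pv_adj_append (xs ys : List (String × String)) :
    pvAdj (xs ++ ys) = pvAdj xs ++ pvBridge xs ys ++ pvAdj ys := by
  induction xs with
  | nil => simp [pvAdj, pvBridge]
  | cons a xs ih =>
    cases xs with
    | nil =>
      cases ys with
      | nil => simp [pvAdj, pvBridge]
      | cons b t => simp [pvAdj, pvBridge]
    | cons b t =>
      have h1 : (a :: b :: t) ++ ys = a :: ((b :: t) ++ ys) := rfl
      have h2 : (b :: t) ++ ys = b :: (t ++ ys) := rfl
      rw [h1, h2]
      show pvStepT a b ++ pvAdj (b :: (t ++ ys)) = _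
      rw [← h2, ih]
      simp [pvAdj, pvBridge, pvStepT, List.append_assoc]

-- the divide-and-conquer recursion computes the adjacent-pair switches
theorem pv_rec_adj : ∀ (n : Nat) (part : List (String × String)), part.length ≤ n →
    pvB_rec part = pvAdj part := by
  intro n
  induction n with
  | zero =>
    intro part h
    have : part = [] := List.eq_nil_of_length_eq_zero (Nat.le_zero.mp h)
    subst this
    rw [pvB_rec, dif_pos (by decide : ([] : List (String × String)).length < 2)]
    rfl
  | succ n ih =>
    intro part h
    rw [pvB_rec]
    by_cases hlt : part.length < 2
    · rw [dif_pos hlt]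
      rcases part with _ | ⟨x, _ | ⟨y, t⟩⟩
      · rfl
      · rfl
      · simp at hlt
    · rw [dif_neg hlt]
      have hlen : 2 ≤ part.length := Nat.not_lt.mp hlt
      have h1 : 1 ≤ part.length / 2 := by omega
      have h2 : part.length / 2 < part.length := by omega
      have hlt1 : (part.take (part.length / 2)).length ≤ n := by
        rw [List.length_take]; omega
      have hlt2 : (part.drop (part.length / 2)).length ≤ n := by
        rw [List.length_drop]; omega
      have hne1 : part.take (part.length / 2) ≠ [] := by
        intro hnil
        have h3 := congrArg List.length hnil
        rw [List.length_take] at h3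
        simp only [List.length_nil] at h3
        omega
      have hne2 : part.drop (part.length / 2) ≠ [] := by
        intro hnil
        have h3 := congrArg List.length hnil
        rw [List.length_drop] at h3
        simp only [List.length_nil] at h3
        omega
      obtain ⟨a, ha⟩ : ∃ a, (part.take (part.length / 2)).getLast? = some a := by
        cases hgl : (part.take (part.length / 2)).getLast? with
        | none => exact absurd (List.getLast?_eq_none_iff.mp hgl) hne1
        | some a => exact ⟨a, rfl⟩
      obtain ⟨b, ys, hby⟩ := List.exists_cons_of_ne_nil hne2
      have hhead : (part.drop (part.length / 2)).head? = some b := by rw [hby]; rfl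
      have hga : PySem.List.pyGet? (part.take (part.length / 2)) (-1) = some a := by
        rw [PySem.List.pyGet?_neg_one, ha]
      have hgb : PySem.List.pyGet? (part.drop (part.length / 2)) 0 = some b := by
        rw [PySem.List.pyGet?_zero, hby]
        rfl
      have hbridge : pvBridge (part.take (part.length / 2)) (part.drop (part.length / 2)) =
          pvStepT a b := by
        simp [pvBridge, ha, hhead]
      show (match PySem.List.pyGet? (List.take (part.length / 2) part) (-1),
              PySem.List.pyGet? (List.drop (part.length / 2) part) 0 with
          | some a, some b =>
              (if a.2 ≠ b.2 then
                  pvB_rec (List.take (part.length / 2) part) ++ [(b.1, a.2, b.2)]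
                else pvB_rec (List.take (part.length / 2) part)) ++
                pvB_rec (List.drop (part.length / 2) part)
          | _, _ =>
              pvB_rec (List.take (part.length / 2) part) ++
                pvB_rec (List.drop (part.length / 2) part)) = pvAdj part
      rw [hga, hgb]
      rw [ih _ hlt1, ih _ hlt2]
      conv_rhs => rw [← List.take_append_drop (part.length / 2) part]
      rw [pv_adj_append, hbridge]
      by_cases hab : a.2 = b.2
      · simp [pvStepT, hab]
      · simp [pvStepT, hab]

-- under Nodup keys, the dict lookup of a stored key returns its stored value
theorem pv_getD_mem (l : List (String × String)) (h : (l.map Prod.fst).Nodup)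
    (p : String × String) (hp : p ∈ l) : (PySem.Dict.mk l).getD p.1 "" = p.2 :=
  PySem.Dict.getD_of_mem_items (PySem.Dict.mk l) (by simpa using hp) (by simpa [PySem.Dict.keys] using h) ""

-- sorted items by first component = sorted keys, each re-paired with its looked-up value
theorem pv_sorted_items (l : List (String × String)) (h : (l.map Prod.fst).Nodup) :
    PySem.List.sorted l (fun p => p.1) =
      (PySem.List.sorted (l.map Prod.fst) (fun k => k)).map
        (fun k => (k, (PySem.Dict.mk l).getD k "")) := by
  apply PySem.List.sorted_eq_of_perm_of_pairwise_lt
  · have hperm : (PySem.List.sorted (l.map Prod.fst) (fun k => k)).Perm (l.map Prod.fst) :=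
      PySem.List.sorted_perm ..
    have := hperm.map (fun k => (k, (PySem.Dict.mk l).getD k ""))
    refine this.trans ?_
    rw [List.map_map]
    have : l.map ((fun k => (k, (PySem.Dict.mk l).getD k "")) ∘ Prod.fst) = l.map id := by
      apply List.map_congr_left
      intro p hp
      simp [pv_getD_mem l h p hp]
    rw [this, List.map_id]
  · rw [List.pairwise_map]
    have hle : (PySem.List.sorted (l.map Prod.fst) (fun k => k)).Pairwise (fun a b => a ≤ b) :=
      PySem.List.sorted_pairwise ..
    have hnd : (PySem.List.sorted (l.map Prod.fst) (fun k => k)).Nodup :=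
      (PySem.List.sorted_perm ..).nodup_iff.mpr h
    have := hle.and hnd
    exact this.imp (fun hab => lt_of_le_of_ne hab.1 hab.2)

-- ===== VERDICT (by name: the statement is the Claim_ definition above) =====
theorem compute_switches_spec : Claim_equal_compute_switches := by
  intro l _ hpre
  unfold Spec_compute_switches compute_switches compute_switches_alt
  by_cases hemp : l = []
  · subst hemp
    have h0 : pvB_rec [] = [] := by
      rw [pvB_rec, dif_pos (by decide : ([] : List (String × String)).length < 2)]
    exact h0.symm
  · simp only [hemp, if_false]
    rw [pv_sorted_items l hpre]
    have hkeys : (PySem.Dict.mk l).keys = l.map Prod.fst := rfl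
    rw [hkeys]
    set days := PySem.List.sorted (l.map Prod.fst) (fun k => k) with hdays
    set d := PySem.Dict.mk l with hd
    -- A's fold over sorted keys = fold of pvStepP over the (day, mood) pairs
    have hA : (days.foldl (pvA_step d) ([], none, none)).1 =
        ((days.map (fun k => (k, d.getD k ""))).foldl pvStepP ([], none, none)).1 := by
      rw [List.foldl_map]
      rfl
    rw [hA]
    set zs := days.map (fun k => (k, d.getD k "")) with hzs
    rw [pv_foldN zs [] none, List.nil_append, ← pv_loopN_filter zs]
    set seq := zs.filter (fun p => p.2 != "neutral") with hseq
    have hneu : ∀ p ∈ seq, p.2 ≠ "neutral" := by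
      intro p hp
      have := List.of_mem_filter hp
      simpa using this
    rw [pv_loopN_adj seq hneu]
    exact (pv_rec_adj seq.length seq (le_refl _)).symm
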